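-- pv_equiv track=rewrite | github.com/ViPLark/test_maney_transfer | core/utils.py | parse_inns
-- ===== SOURCE A (Python) =====
-- def parse_inns(value: str):
--     inns = set()
--     last_inn = []
--     for symbol in value:
--         if symbol.isdigit():
--             last_inn.append(symbol)
--         elif last_inn:
--             inns.add(int(''.join(last_inn)))
--             last_inn.clear()
--     if last_inn:
--         inns.add(int(''.join(last_inn)))
--     return inns
-- ===== SOURCE B (Python) =====
-- def parse_inns(value: str):
--     masked = ''.join(c if c.isdigit() else ' ' for c in value)
--     return {int(token) for token in masked.split()}
-- ===== Notes on version B (the rewrite author's own statement) =====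
-- stated objective: simpler
-- what changed: Replaces A's single-pass manual accumulator (append/clear bookkeeping plus a post-loop flush) by a staged pipeline: mask every non-digit character to a space, then let str.split() deliver the maximal digit runs, and build the set of their int values with a comprehension.
import Mathlib
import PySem

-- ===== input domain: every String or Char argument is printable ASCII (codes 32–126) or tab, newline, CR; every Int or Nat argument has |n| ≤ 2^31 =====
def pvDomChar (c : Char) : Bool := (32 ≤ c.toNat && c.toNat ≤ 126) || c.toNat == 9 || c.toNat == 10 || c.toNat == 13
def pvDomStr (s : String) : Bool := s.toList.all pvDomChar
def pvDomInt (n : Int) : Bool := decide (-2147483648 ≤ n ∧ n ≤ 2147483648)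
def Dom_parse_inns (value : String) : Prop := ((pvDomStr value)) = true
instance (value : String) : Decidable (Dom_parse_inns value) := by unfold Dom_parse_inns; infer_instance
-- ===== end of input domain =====

-- B replaces A's manual accumulator loop by a staged pipeline: mask non-digits to spaces,
-- str.split(), set of int values (objective: simpler).
-- int(token) on an all-digit token always succeeds, so the getD 0 default is unreachable.
def pvRunVal (g : List Char) : Int := (PySem.Int.ofChars? g).getD 0

-- ===== PORT A =====
-- state: (inns, last_inn); branches in A's order: isdigit → append, elif last_inn → add+clear.
def parse_inns_goA (inns : PySem.Set Int) (last : List Char) : List Char → PySem.Set Int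
  | [] => if last = [] then inns else PySem.Set.add inns (pvRunVal last)
  | c :: cs =>
    if PySem.Chars.isdigit c then parse_inns_goA inns (last ++ [c]) cs
    else if last ≠ [] then parse_inns_goA (PySem.Set.add inns (pvRunVal last)) [] cs
    else parse_inns_goA inns last cs

def parse_inns (value : String) : List Int :=
  parse_inns_goA PySem.Set.empty [] value.toList

-- ===== PORT B =====
-- masked = ''.join(c if c.isdigit() else ' ' for c in value)
def pvMask (cs : List Char) : List Char :=
  cs.map (fun c => if PySem.Chars.isdigit c then c else ' ')

-- {int(token) for token in masked.split()}
def parse_inns_alt (value : String) : List Int :=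
  PySem.Set.ofList ((PySem.Chars.split₀ (pvMask value.toList)).map pvRunVal)

-- ===== PRECONDITION & SPEC =====
def Spec_parse_inns (value : String) (out : List Int) : Prop := out = parse_inns_alt value
instance (value : String) (out : List Int) : Decidable (Spec_parse_inns value out) := by unfold Spec_parse_inns; infer_instance

-- ===== CLAIM =====
def Claim_equal_parse_inns : Prop := ∀ (value : String), Dom_parse_inns value → Spec_parse_inns value (parse_inns value)

-- ===== LEMMAS AND PROOFS =====

theorem pv_digit_not_space (c : Char) (h : PySem.Chars.isdigit c = true) :
    PySem.Chars.isspace c = false := by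
  simp only [PySem.Chars.isdigit, Bool.and_eq_true, decide_eq_true_eq, Char.le_def] at h
  have h48 : (48 : Nat) ≤ c.toNat := UInt32.le_iff_toNat_le.mp h.1
  have h57 : c.toNat ≤ 57 := UInt32.le_iff_toNat_le.mp h.2
  simp [PySem.Chars.isspace]
  omega

-- accumulator lemma for split₀.go
theorem pv_go_acc (cs : List Char) : ∀ (cur : List Char) (acc : List (List Char)),
    PySem.Chars.split₀.go cs cur acc = acc.reverse ++ PySem.Chars.split₀.go cs cur [] := by
  induction cs with
  | nil =>
    intro cur acc
    simp [PySem.Chars.split₀.go]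
    split_ifs <;> simp
  | cons c cs ih =>
    intro cur acc
    by_cases hs : PySem.Chars.isspace c = true
    · by_cases hc : cur.isEmpty = true
      · simp only [PySem.Chars.split₀.go, hs, hc, if_true]
        exact ih [] acc
      · simp only [PySem.Chars.split₀.go, hs, hc, if_true]
        rw [ih [] (cur.reverse :: acc), ih [] [cur.reverse]]
        simp
    · simp only [PySem.Chars.split₀.go, hs]
      exact ih (c :: cur) acc

theorem pv_goA_eq (cs : List Char) : ∀ (inns : PySem.Set Int) (last : List Char),
    (∀ c ∈ last, PySem.Chars.isdigit c = true) →
    parse_inns_goA inns last cs =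
      PySem.Set.update inns
        ((PySem.Chars.split₀.go (pvMask cs) last.reverse []).map pvRunVal) := by
  induction cs with
  | nil =>
    intro inns last _
    by_cases hl : last = []
    · simp [parse_inns_goA, hl, pvMask, PySem.Chars.split₀.go, PySem.Set.update]
    · have hne : last.reverse.isEmpty = false := by
        simp [hl]
      simp [parse_inns_goA, hl, pvMask, PySem.Chars.split₀.go, hne, PySem.Set.update]
  | cons c cs ih =>
    intro inns last hdig
    by_cases hd : PySem.Chars.isdigit c = true
    · have hs := pv_digit_not_space c hd
      have hstep : parse_inns_goA inns last (c :: cs) = parse_inns_goA inns (last ++ [c]) cs := by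
        simp [parse_inns_goA, hd]
      rw [hstep, ih inns (last ++ [c])
        (by intro x hx; rcases List.mem_append.mp hx with h | h
            · exact hdig x h
            · simpa using (List.mem_singleton.mp h) ▸ hd)]
      simp [pvMask, PySem.Chars.split₀.go, hd, hs]
    · have hmask : pvMask (c :: cs) = ' ' :: pvMask cs := by simp [pvMask, hd]
      by_cases hl : last = []
      · have hstep : parse_inns_goA inns last (c :: cs) = parse_inns_goA inns last cs := by
          simp [parse_inns_goA, hd, hl]
        rw [hstep, ih inns last hdig, hmask, hl]
        simp [PySem.Chars.split₀.go, PySem.Chars.isspace]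
      · have hstep : parse_inns_goA inns last (c :: cs) =
            parse_inns_goA (PySem.Set.add inns (pvRunVal last)) [] cs := by
          simp [parse_inns_goA, hd, hl]
        rw [hstep, ih _ [] (by simp), hmask]
        have hne : last.reverse.isEmpty = false := by simp [hl]
        have hsp : PySem.Chars.isspace ' ' = true := by decide
        simp only [PySem.Chars.split₀.go, hsp, hne, if_true]
        rw [pv_go_acc (pvMask cs) [] [last.reverse.reverse]]
        simp [PySem.Set.update]

-- ===== VERDICT =====
theorem parse_inns_spec : Claim_equal_parse_inns := by
  intro value _
  unfold Spec_parse_inns parse_inns parse_inns_alt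
  rw [pv_goA_eq _ _ _ (by simp)]
  simp [PySem.Set.update, PySem.Set.ofList_eq_foldl, PySem.Chars.split₀]
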